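-- pv_equiv track=rewrite | github.com/melissa1703/summer25_nlp | analysis.py | count_results
-- ===== SOURCE A (Python) =====
-- def count_results(suggestions : list[str]) -> tuple:
--     idx : int = 0
--
--     top_5 : list[str] = []
--     i : int = 0
--     v : int = 0
--     g : int = 0
--
--     while idx < len(suggestions):
--         current = suggestions[idx][-1]
--
--         # (1) log the top five tags:
--         if (idx < 5):
--             top_5.append(current.upper())
--
--         if (current.upper() == "I"):
--             i += 1
--         elif (current.upper() == "V"):
--             v += 1
--         elif (current.upper() == "G"):
--             g += 1
--
--
--         idx += 1
--
--     return (top_5, i, v, g)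
-- ===== SOURCE B (Python) =====
-- def count_results(suggestions):
--     tags = [s[-1].upper() for s in suggestions]
--     return (tags[:5], tags.count("I"), tags.count("V"), tags.count("G"))
-- ===== Notes on version B (the rewrite author's own statement) =====
-- stated objective: simpler
-- what changed: Replaced the fused index/while loop with three scalar accumulators and an if/elif chain by staged passes: materialize the uppercased-last-char tag list once, then slice its first five and take three list.count passes over it.
import Mathlib
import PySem

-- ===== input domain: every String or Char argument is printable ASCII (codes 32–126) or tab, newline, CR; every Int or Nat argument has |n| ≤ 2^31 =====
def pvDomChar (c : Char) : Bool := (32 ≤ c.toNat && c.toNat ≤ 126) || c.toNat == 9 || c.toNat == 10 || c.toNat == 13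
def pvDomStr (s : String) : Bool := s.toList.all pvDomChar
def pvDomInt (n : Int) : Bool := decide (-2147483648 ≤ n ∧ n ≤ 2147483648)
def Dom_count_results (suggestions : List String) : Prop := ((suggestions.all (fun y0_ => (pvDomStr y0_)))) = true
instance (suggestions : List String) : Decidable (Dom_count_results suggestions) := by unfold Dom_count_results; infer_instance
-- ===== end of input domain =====

-- B drops A's fused while loop with three scalar counters and an if/elif chain:
-- it materializes the uppercased-tag list once, slices its first five, and counts with three list.count passes (simpler).

-- ===== PORT A =====
-- s[-1].upper() as a one-character string (IndexError on "" is excluded by Pre_; "" is the total default)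
def pvLastUpper (s : String) : String :=
  PySem.Str.upper ((PySem.Str.pyGet? s (-1)).elim "" (fun c => String.ofList [c]))

-- A's while loop: iterates idx over suggestions, appending to top_5 while idx < 5
-- and bumping i/v/g through the if/elif chain
def pvALoop : List String → Int → List String → Int → Int → Int → List String × Int × Int × Int
  | [], _, top5, i, v, g => (top5, i, v, g)
  | s :: rest, idx, top5, i, v, g =>
    let cu := pvLastUpper s
    let top5' := if idx < 5 then top5 ++ [cu] else top5
    if cu = "I" then pvALoop rest (idx + 1) top5' (i + 1) v g
    else if cu = "V" then pvALoop rest (idx + 1) top5' i (v + 1) g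
    else if cu = "G" then pvALoop rest (idx + 1) top5' i v (g + 1)
    else pvALoop rest (idx + 1) top5' i v g

def count_results (suggestions : List String) : List String × Int × Int × Int :=
  pvALoop suggestions 0 [] 0 0 0

-- ===== PORT B =====
def count_results_alt (suggestions : List String) : List String × Int × Int × Int :=
  let tags := suggestions.map pvLastUpper
  (PySem.List.slice tags none (some 5),
   (PySem.List.count tags "I" : Int),
   (PySem.List.count tags "V" : Int),
   (PySem.List.count tags "G" : Int))

-- ===== PRECONDITION & SPEC =====
-- Pre_ excludes lists containing an empty string, on which both A and B raise IndexError at s[-1]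
def Pre_count_results (suggestions : List String) : Prop := ∀ s ∈ suggestions, s ≠ ""
instance (suggestions : List String) : Decidable (Pre_count_results suggestions) := by unfold Pre_count_results; infer_instance
def pvWitness_count_results : List String := ["aI", "bv", "xG", "q", "zI", "yi"]

def Spec_count_results (suggestions : List String) (out : List String × Int × Int × Int) : Prop := out = count_results_alt suggestions
instance (suggestions : List String) (out : List String × Int × Int × Int) : Decidable (Spec_count_results suggestions out) := by unfold Spec_count_results; infer_instance

-- ===== CLAIM (what is proved, stated in full; the proofs are below) =====
def Claim_equal_count_results : Prop := ∀ (suggestions : List String), Dom_count_results suggestions → Pre_count_results suggestions → Spec_count_results suggestions (count_results suggestions)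

-- ===== LEMMAS AND PROOFS =====

lemma pvALoop_eq (l : List String) : ∀ (idx : Int) (top5 : List String) (i v g : Int), 0 ≤ idx →
    pvALoop l idx top5 i v g =
      (top5 ++ (l.take (5 - idx).toNat).map pvLastUpper,
       i + ((l.map pvLastUpper).count "I" : Int),
       v + ((l.map pvLastUpper).count "V" : Int),
       g + ((l.map pvLastUpper).count "G" : Int)) := by
  induction l with
  | nil => intro idx top5 i v g _; simp [pvALoop]
  | cons s rest ih =>
    intro idx top5 i v g hidx
    have htop :
        (if idx < 5 then top5 ++ [pvLastUpper s] else top5)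
          ++ ((rest.take (5 - (idx + 1)).toNat).map pvLastUpper)
        = top5 ++ (((s :: rest).take (5 - idx).toNat).map pvLastUpper) := by
      by_cases h5 : idx < 5
      · have h1 : (5 - idx).toNat = (5 - (idx + 1)).toNat + 1 := by omega
        simp [h5, h1]
      · have h1 : (5 - idx).toNat = 0 := by omega
        have h2 : (5 - (idx + 1)).toNat = 0 := by omega
        simp [h5, h1, h2]
    simp only [pvALoop]
    by_cases hI : pvLastUpper s = "I"
    · rw [if_pos hI, ih _ _ _ _ _ (by omega)]
      simp only [Prod.mk.injEq]
      refine ⟨htop, ?_, ?_, ?_⟩ <;> simp [List.count_cons, hI] <;> omega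
    · rw [if_neg hI]
      by_cases hV : pvLastUpper s = "V"
      · rw [if_pos hV, ih _ _ _ _ _ (by omega)]
        simp only [Prod.mk.injEq]
        refine ⟨htop, ?_, ?_, ?_⟩ <;> simp [List.count_cons, hI, hV] <;> omega
      · rw [if_neg hV]
        by_cases hG : pvLastUpper s = "G"
        · rw [if_pos hG, ih _ _ _ _ _ (by omega)]
          simp only [Prod.mk.injEq]
          refine ⟨htop, ?_, ?_, ?_⟩ <;> simp [List.count_cons, hI, hV, hG] <;> omega
        · rw [if_neg hG, ih _ _ _ _ _ (by omega)]
          simp only [Prod.mk.injEq]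
          refine ⟨htop, ?_, ?_, ?_⟩ <;> simp [List.count_cons, hI, hV, hG] <;> omega

-- ===== VERDICT (by name: the statement is the Claim_ definition above) =====
theorem count_results_spec : Claim_equal_count_results := by
  intro suggestions _ _
  unfold Spec_count_results count_results count_results_alt
  rw [pvALoop_eq suggestions 0 [] 0 0 0 le_rfl]
  simp only []
  rw [PySem.List.slice_to (suggestions.map pvLastUpper) (b := 5) (by norm_num)]
  simp [PySem.List.count_eq, List.map_take]
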